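-- pv_equiv track=rewrite | github.com/rjav1/3600-bot | 3600-agents/RattleBot_greedy_opp/search.py | _manhattan_2_mask
-- ===== SOURCE A (Python) =====
-- def _manhattan_2_mask(x: int, y: int) -> int:
--     """64-bit mask of cells whose Manhattan distance from (x,y) is ≤ 2.
--
--     Used by BS-3 to measure how much of a new carpet lies within the
--     opponent's 2-step reach. ≤ 13 cells on the interior; edges/corners
--     clip naturally via the 0..7 bounds check.
--     """
--     m = 0
--     for dx in (-2, -1, 0, 1, 2):
--         for dy in (-2, -1, 0, 1, 2):
--             if abs(dx) + abs(dy) > 2: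
--                 continue
--             nx, ny = x + dx, y + dy
--             if 0 <= nx < 8 and 0 <= ny < 8:
--                 m |= (1 << (ny * 8 + nx))
--     return m
-- ===== SOURCE B (Python) =====
-- def _manhattan_2_mask(x: int, y: int) -> int:
--     """Row-span version: one contiguous bit run per in-bounds row."""
--     m = 0
--     for dy in (-2, -1, 0, 1, 2):
--         ny = y + dy
--         if not (0 <= ny < 8):
--             continue
--         w = 2 - abs(dy)
--         lo = max(0, x - w)
--         hi = min(7, x + w)
--         if lo <= hi:
--             m |= ((1 << (hi - lo + 1)) - 1) << (ny * 8 + lo)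
--     return m
-- ===== Notes on version B (the rewrite author's own statement) =====
-- stated objective: alternative
-- what changed: Instead of testing all 25 (dx,dy) offsets cell by cell, B loops only over the 5 rows, clamps the row's half-width span to [0,7] and ORs in one contiguous run mask per row.
import Mathlib
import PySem

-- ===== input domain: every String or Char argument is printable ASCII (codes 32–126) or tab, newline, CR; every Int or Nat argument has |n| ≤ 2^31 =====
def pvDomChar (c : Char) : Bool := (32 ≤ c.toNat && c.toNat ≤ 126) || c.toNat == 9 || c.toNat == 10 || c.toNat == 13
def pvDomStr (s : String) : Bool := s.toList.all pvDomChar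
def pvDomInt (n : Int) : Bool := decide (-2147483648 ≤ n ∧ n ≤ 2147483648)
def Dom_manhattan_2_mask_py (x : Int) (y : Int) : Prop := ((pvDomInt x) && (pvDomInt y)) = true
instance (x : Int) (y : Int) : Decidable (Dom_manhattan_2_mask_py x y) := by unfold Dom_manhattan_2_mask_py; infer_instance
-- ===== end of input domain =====

-- B replaces A's 25 per-cell bound checks by one clamped contiguous bit run per row (alternative decomposition).

-- ===== PORT A =====
-- literal port of A: fold over dx then dy in (-2,-1,0,1,2), skip |dx|+|dy|>2, OR single bits.
-- the shift amount is nonnegative whenever the guard holds, so Int shiftLeft is exact there.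
def manhattan_2_mask_py (x : Int) (y : Int) : Int :=
  [(-2 : Int), -1, 0, 1, 2].foldl (fun m dx =>
    [(-2 : Int), -1, 0, 1, 2].foldl (fun m dy =>
      if |dx| + |dy| > 2 then m
      else
        let nx := x + dx
        let ny := y + dy
        if 0 ≤ nx ∧ nx < 8 ∧ 0 ≤ ny ∧ ny < 8 then
          Int.lor m ((1 : Int) <<< (ny * 8 + nx))
        else m) m) 0

-- ===== PORT B =====
-- literal port of B: fold over dy only, clamp the row span, OR one run mask per kept row.
def manhattan_2_mask_py_alt (x : Int) (y : Int) : Int :=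
  [(-2 : Int), -1, 0, 1, 2].foldl (fun m dy =>
    let ny := y + dy
    if ¬ (0 ≤ ny ∧ ny < 8) then m
    else
      let w := 2 - |dy|
      let lo := max 0 (x - w)
      let hi := min 7 (x + w)
      if lo ≤ hi then
        Int.lor m ((((1 : Int) <<< (hi - lo + 1)) - 1) <<< (ny * 8 + lo))
      else m) 0

-- ===== PRECONDITION & SPEC =====
def Spec_manhattan_2_mask_py (x : Int) (y : Int) (out : Int) : Prop := out = manhattan_2_mask_py_alt x y
instance (x : Int) (y : Int) (out : Int) : Decidable (Spec_manhattan_2_mask_py x y out) := by unfold Spec_manhattan_2_mask_py; infer_instance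

-- ===== CLAIM (what is proved, stated in full; the proofs are below) =====
def Claim_equal_manhattan_2_mask_py : Prop := ∀ (x : Int) (y : Int), Dom_manhattan_2_mask_py x y → Spec_manhattan_2_mask_py x y (manhattan_2_mask_py x y)

-- ===== LEMMAS AND PROOFS =====

-- a fold whose step fixes every accumulator leaves the initial value unchanged
lemma foldl_fix {α β : Type} (l : List β) (f : α → β → α) (a : α)
    (h : ∀ m d, d ∈ l → f m d = m) : l.foldl f a = a := by
  induction l generalizing a with
  | nil => rfl
  | cons d t ih =>
      rw [List.foldl_cons, h a d (by simp)]
      exact ih a (fun m e he => h m e (by simp [he]))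

-- outside x,y ∈ [-2,9] every bounds guard is false, so A returns 0
lemma A_zero_of_far (x y : Int) (h : x < -2 ∨ 9 < x ∨ y < -2 ∨ 9 < y) :
    manhattan_2_mask_py x y = 0 := by
  unfold manhattan_2_mask_py
  refine foldl_fix _ _ _ (fun m dx hdx => ?_)
  refine foldl_fix _ _ _ (fun m' dy hdy => ?_)
  simp only [List.mem_cons, List.not_mem_nil, or_false] at hdx hdy
  dsimp only
  split_ifs <;> first | rfl | omega

-- and likewise every row of B is skipped
lemma B_zero_of_far (x y : Int) (h : x < -2 ∨ 9 < x ∨ y < -2 ∨ 9 < y) :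
    manhattan_2_mask_py_alt x y = 0 := by
  unfold manhattan_2_mask_py_alt
  refine foldl_fix _ _ _ (fun m dy hdy => ?_)
  simp only [List.mem_cons, List.not_mem_nil, or_false] at hdy
  rcases hdy with rfl | rfl | rfl | rfl | rfl <;> norm_num <;>
    (intros; exfalso; omega)

-- ===== VERDICT (by name: the statement is the Claim_ definition above) =====
theorem manhattan_2_mask_py_spec : Claim_equal_manhattan_2_mask_py := by
  intro x y _
  unfold Spec_manhattan_2_mask_py
  by_cases hx : -2 ≤ x ∧ x ≤ 9
  · by_cases hy : -2 ≤ y ∧ y ≤ 9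
    · obtain ⟨hx1, hx2⟩ := hx
      obtain ⟨hy1, hy2⟩ := hy
      interval_cases x <;> interval_cases y <;> decide
    · rw [A_zero_of_far x y (by omega), B_zero_of_far x y (by omega)]
  · rw [A_zero_of_far x y (by omega), B_zero_of_far x y (by omega)]
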